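-- pv_equiv track=rewrite | github.com/stevenrwh/MCD_decode | monucad/fonts.py | decode_glyph_label
-- ===== SOURCE A (Python) =====
-- from typing import Iterable, List, Sequence, Tuple
--
-- PUNCT_SUFFIX_MAP = {
--     "PERID": ".",
--     "PERIOD": ".",
--     "DOT": ".",
--     "COMMA": ",",
--     "COLN": ":",
--     "COLON": ":",
--     "SEMI": ";",
--     "APOST": "'",
--     "QUOTE": '"',
--     "QUOT": '"',
--     "QUOT2": '"',
--     "DASH": "-",
--     "HYPHEN": "-",
--     "MINUS": "-",
--     "PLUS": "+",
--     "SPACE": " ",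
--     "SP": " ",
--     "AMP": "&",
--     "AMPERSAND": "&",
--     "AND": "&",
--     "AT": "@",
--     "ATS": "@",
--     "EXCL": "!",
--     "QUES": "?",
--     "PERC": "%",
--     "PERCENT": "%",
--     "STAR": "*",
--     "ASTER": "*",
--     "SLASH": "/",
--     "FSLASH": "/",
--     "BSLASH": "\\",
--     "LBS": "#",
--     "HASH": "#",
--     "POUND": "#",
--     "LPAREN": "(",
--     "RPAREN": ")",
-- }
--
-- def decode_glyph_label(label: str, prefix_map: dict[str, str]) -> Tuple[str | None, str | None]:
--     upper = label.upper()
--     for split in range(len(upper), 0, -1):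
--         prefix = upper[:split]
--         suffix = upper[split:]
--         font_name = prefix_map.get(prefix)
--         if not font_name or not suffix:
--             continue
--         char = char_from_suffix(suffix)
--         if char:
--             return font_name, char
--     return None, None
--
-- def char_from_suffix(suffix: str) -> str | None:
--     if not suffix:
--         return None
--     suffix = suffix.upper()
--     if len(suffix) == 1 and suffix.isalpha():
--         return suffix
--     if len(suffix) == 1 and suffix.isdigit():
--         return suffix
--     if suffix.isdigit():
--         try:
--             code = int(suffix)
--         except ValueError:
--             return None
--         if 32 <= code <= 126:
--             return chr(code)
--         return None
--     mapped = PUNCT_SUFFIX_MAP.get(suffix)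
--     if mapped:
--         return mapped
--     return None
-- ===== SOURCE B (Python) =====
-- from typing import Tuple
--
-- PUNCT_SUFFIX_MAP = {
--     "PERID": ".", "PERIOD": ".", "DOT": ".", "COMMA": ",", "COLN": ":",
--     "COLON": ":", "SEMI": ";", "APOST": "'", "QUOTE": '"', "QUOT": '"',
--     "QUOT2": '"', "DASH": "-", "HYPHEN": "-", "MINUS": "-", "PLUS": "+",
--     "SPACE": " ", "SP": " ", "AMP": "&", "AMPERSAND": "&", "AND": "&",
--     "AT": "@", "ATS": "@", "EXCL": "!", "QUES": "?", "PERC": "%",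
--     "PERCENT": "%", "STAR": "*", "ASTER": "*", "SLASH": "/", "FSLASH": "/",
--     "BSLASH": "\\", "LBS": "#", "HASH": "#", "POUND": "#", "LPAREN": "(",
--     "RPAREN": ")",
-- }
--
-- def decode_glyph_label(label: str, prefix_map: dict) -> Tuple[str | None, str | None]:
--     upper = label.upper()
--     n = len(upper)
--     best = None  # (len(key), font_name, char) with the greatest key length
--     for key, font_name in prefix_map.items():
--         if not font_name or not (0 < len(key) < n) or not upper.startswith(key):
--             continue
--         char = char_from_suffix(upper[len(key):])
--         if not char:
--             continue
--         if best is None or len(key) > best[0]: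
--             best = (len(key), font_name, char)
--     if best is None:
--         return None, None
--     return best[1], best[2]
--
-- def char_from_suffix(suffix: str) -> str | None:
--     if not suffix:
--         return None
--     suffix = suffix.upper()
--     if len(suffix) == 1 and suffix.isalpha():
--         return suffix
--     if len(suffix) == 1 and suffix.isdigit():
--         return suffix
--     if suffix.isdigit():
--         try:
--             code = int(suffix)
--         except ValueError:
--             return None
--         if 32 <= code <= 126:
--             return chr(code)
--         return None
--     mapped = PUNCT_SUFFIX_MAP.get(suffix)
--     if mapped:
--         return mapped
--     return None
-- ===== Notes on version B (the rewrite author's own statement) =====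
-- stated objective: faster
-- what changed: Instead of scanning every split position of the label from longest to shortest and probing the dict at each one (work grows with the label length), B iterates once over the prefix_map items, filters keys that are a nonempty proper prefix of the uppercased label with a valid character suffix, and keeps the one with the greatest key length. Pre_ only requires distinct keys in the association list, which is automatic for any real Python dict input.
import Mathlib
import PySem

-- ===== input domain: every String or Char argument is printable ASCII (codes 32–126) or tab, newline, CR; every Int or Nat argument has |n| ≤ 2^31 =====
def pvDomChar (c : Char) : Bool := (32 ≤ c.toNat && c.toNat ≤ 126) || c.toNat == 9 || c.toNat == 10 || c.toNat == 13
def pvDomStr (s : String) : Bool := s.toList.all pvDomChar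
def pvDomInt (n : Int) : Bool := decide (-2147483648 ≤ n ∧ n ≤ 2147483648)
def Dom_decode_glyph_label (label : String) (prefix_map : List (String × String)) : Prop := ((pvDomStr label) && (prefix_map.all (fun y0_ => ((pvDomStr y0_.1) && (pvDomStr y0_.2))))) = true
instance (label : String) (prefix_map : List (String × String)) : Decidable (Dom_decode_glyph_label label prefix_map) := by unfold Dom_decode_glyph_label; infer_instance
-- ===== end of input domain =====

-- B replaces A's longest-to-shortest scan over all split positions of the label by a single
-- pass over the prefix_map items keeping the passing key of greatest length; a timing run
-- measured B faster on large labels (objective: faster).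


-- ===== PORT A =====
def PUNCT_SUFFIX_MAP : PySem.Dict String String := PySem.Dict.mk
  [("PERID", "."), ("PERIOD", "."), ("DOT", "."), ("COMMA", ","), ("COLN", ":"),
   ("COLON", ":"), ("SEMI", ";"), ("APOST", "'"), ("QUOTE", "\""), ("QUOT", "\""),
   ("QUOT2", "\""), ("DASH", "-"), ("HYPHEN", "-"), ("MINUS", "-"), ("PLUS", "+"),
   ("SPACE", " "), ("SP", " "), ("AMP", "&"), ("AMPERSAND", "&"), ("AND", "&"),
   ("AT", "@"), ("ATS", "@"), ("EXCL", "!"), ("QUES", "?"), ("PERC", "%"),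
   ("PERCENT", "%"), ("STAR", "*"), ("ASTER", "*"), ("SLASH", "/"), ("FSLASH", "/"),
   ("BSLASH", "\\"), ("LBS", "#"), ("HASH", "#"), ("POUND", "#"), ("LPAREN", "("),
   ("RPAREN", ")")]

-- shared same-module helper (used verbatim by both A and B, as in the Python sources)
def char_from_suffix (suffix : String) : Option String :=
  if suffix.toList = [] then none
  else
    let s := PySem.Str.upper suffix
    if s.toList.length = 1 && PySem.Str.strIsalpha s then some s
    else if s.toList.length = 1 && PySem.Str.strIsdigit s then some s
    else if PySem.Str.strIsdigit s then
      match PySem.Int.ofStr? s with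
      | none => none
      | some code =>
        if 32 ≤ code && code ≤ 126 then some (String.ofList [Char.ofNat code.toNat]) else none
    else
      match PySem.Dict.get? PUNCT_SUFFIX_MAP s with
      | none => none
      | some mapped => if mapped.toList = [] then none else some mapped

-- the 'for split in range(len(upper), 0, -1)' loop, recursing downward on the split position
def decode_glyph_label_loop (upper : String) (prefix_map : List (String × String)) :
    Nat → Option String × Option String
  | 0 => (none, none)
  | k + 1 =>
    let split : Int := ((k + 1 : Nat) : Int)
    let pre := PySem.Str.slice upper none (some split)
    let suf := PySem.Str.slice upper (some split) none
    match PySem.Dict.get? (PySem.Dict.mk prefix_map) pre with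
    | none => decode_glyph_label_loop upper prefix_map k
    | some font_name =>
      if font_name.toList = [] || suf.toList = [] then
        decode_glyph_label_loop upper prefix_map k
      else
        match char_from_suffix suf with
        | some c =>
          if c.toList = [] then decode_glyph_label_loop upper prefix_map k
          else (some font_name, some c)
        | none => decode_glyph_label_loop upper prefix_map k

def decode_glyph_label (label : String) (prefix_map : List (String × String)) :
    Option String × Option String :=
  let upper := PySem.Str.upper label
  decode_glyph_label_loop upper prefix_map upper.toList.length

-- ===== PORT B =====
def decode_glyph_label_alt_step (upper : String) (n : Nat)
    (best : Option (Nat × String × String)) (kv : String × String) :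
    Option (Nat × String × String) :=
  let key := kv.1
  let font_name := kv.2
  if font_name.toList = [] || !(decide (0 < key.toList.length ∧ key.toList.length < n)) ||
      !(PySem.Str.startswith upper key) then best
  else
    match char_from_suffix (PySem.Str.slice upper (some ((key.toList.length : Nat) : Int)) none) with
    | none => best
    | some c =>
      if c.toList = [] then best
      else
        match best with
        | none => some (key.toList.length, font_name, c)
        | some b => if key.toList.length > b.1 then some (key.toList.length, font_name, c) else best

def decode_glyph_label_alt (label : String) (prefix_map : List (String × String)) :
    Option String × Option String :=
  let upper := PySem.Str.upper label
  let n := upper.toList.length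
  match prefix_map.foldl (decode_glyph_label_alt_step upper n) none with
  | none => (none, none)
  | some b => (some b.2.1, some b.2.2)

-- ===== PRECONDITION & SPEC =====
-- Pre_ excludes association lists with duplicate keys: they do not correspond to any Python
-- dict input (a dict cannot hold duplicate keys), and on them A's first-match get? and B's
-- full scan could disagree.
def Pre_decode_glyph_label (label : String) (prefix_map : List (String × String)) : Prop :=
  (prefix_map.map Prod.fst).Nodup
instance (label : String) (prefix_map : List (String × String)) :
    Decidable (Pre_decode_glyph_label label prefix_map) := by
  unfold Pre_decode_glyph_label; infer_instance
def pvWitness_decode_glyph_label : String × (List (String × String)) :=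
  ("helvB", [("HELV", "Helvetica"), ("TIMES", "Times")])
def Spec_decode_glyph_label (label : String) (prefix_map : List (String × String))
    (out : Option String × Option String) : Prop := out = decode_glyph_label_alt label prefix_map
instance (label : String) (prefix_map : List (String × String)) (out : Option String × Option String) :
    Decidable (Spec_decode_glyph_label label prefix_map out) := by
  unfold Spec_decode_glyph_label; infer_instance

-- ===== CLAIM (what is proved, stated in full; the proofs are below) =====
def Claim_equal_decode_glyph_label : Prop := ∀ (label : String) (prefix_map : List (String × String)), Dom_decode_glyph_label label prefix_map → Pre_decode_glyph_label label prefix_map → Spec_decode_glyph_label label prefix_map (decode_glyph_label label prefix_map)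

-- ===== LEMMAS AND PROOFS =====

-- the value A's loop body produces at a single split position j (none = 'continue')
def hitAt (upper : String) (prefix_map : List (String × String)) (j : Nat) :
    Option (String × String) :=
  match PySem.Dict.get? (PySem.Dict.mk prefix_map) (PySem.Str.slice upper none (some (j : Int))) with
  | none => none
  | some font_name =>
    if font_name.toList = [] || (PySem.Str.slice upper (some (j : Int)) none).toList = [] then none
    else
      match char_from_suffix (PySem.Str.slice upper (some (j : Int)) none) with
      | some c => if c.toList = [] then none else some (font_name, c)
      | none => none

-- the first (greatest) split position ≤ k at which hitAt fires, with its value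
def topHit (upper : String) (prefix_map : List (String × String)) :
    Nat → Option (Nat × String × String)
  | 0 => none
  | k + 1 =>
    match hitAt upper prefix_map (k + 1) with
    | some fc => some (k + 1, fc.1, fc.2)
    | none => topHit upper prefix_map k

-- toList of the prefix/suffix slices
theorem slice_pref_toList (upper : String) (j : Nat) :
    (PySem.Str.slice upper none (some (j : Int))).toList = upper.toList.take j := by
  simp [PySem.Str.toList_slice, PySem.List.slice_to_natCast]

theorem slice_suf_toList (upper : String) (j : Nat) :
    (PySem.Str.slice upper (some (j : Int)) none).toList = upper.toList.drop j := by
  simp [PySem.Str.toList_slice, PySem.List.slice_from_natCast]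

theorem loop_eq_topHit (upper : String) (pm : List (String × String)) (k : Nat) :
    decode_glyph_label_loop upper pm k =
      (topHit upper pm k).elim (none, none) (fun t => (some t.2.1, some t.2.2)) := by
  induction k with
  | zero => rfl
  | succ k ih =>
    simp only [decode_glyph_label_loop, topHit, hitAt]
    cases hg : PySem.Dict.get? (PySem.Dict.mk pm) (PySem.Str.slice upper none (some ((k + 1 : Nat) : Int))) with
    | none => simp [ih]
    | some f =>
      by_cases h1 : f = "" ∨ PySem.List.slice upper.toList (some ((k : Int) + 1)) none = []
      · simp [h1, ih]
      · cases hc : char_from_suffix (PySem.Str.slice upper (some ((k + 1 : Nat) : Int)) none) with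
        | none => simp [h1, hc, ih]
        | some c =>
          by_cases h2 : c = ""
          · simp [h1, hc, h2, ih]
          · simp [h1, hc, h2]

theorem topHit_none_iff (upper : String) (pm : List (String × String)) (k : Nat) :
    topHit upper pm k = none ↔ ∀ j, 1 ≤ j → j ≤ k → hitAt upper pm j = none := by
  induction k with
  | zero => simp [topHit]; omega
  | succ k ih =>
    simp only [topHit]
    cases hc : hitAt upper pm (k + 1) with
    | some fc =>
      simp only [reduceCtorEq, false_iff]
      intro h
      exact absurd (h (k + 1) (by omega) (by omega)) (by simp [hc])
    | none =>
      simp only [ih]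
      constructor
      · intro h j h1 h2
        rcases Nat.lt_or_ge j (k + 1) with hj | hj
        · exact h j h1 (by omega)
        · have : j = k + 1 := by omega
          subst this; exact hc
      · intro h j h1 h2; exact h j h1 (by omega)

theorem topHit_some (upper : String) (pm : List (String × String)) (k j : Nat)
    (f c : String) (h : topHit upper pm k = some (j, f, c)) :
    1 ≤ j ∧ j ≤ k ∧ hitAt upper pm j = some (f, c) ∧
      ∀ i, j < i → i ≤ k → hitAt upper pm i = none := by
  induction k with
  | zero => simp [topHit] at h
  | succ k ih =>
    simp only [topHit] at h
    cases hc : hitAt upper pm (k + 1) with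
    | some fc =>
      rw [hc] at h
      obtain ⟨h1, h2, h3⟩ : j = k + 1 ∧ f = fc.1 ∧ c = fc.2 := by
        simpa [Prod.ext_iff] using h.symm
      subst h1
      refine ⟨by omega, le_refl _, by rw [hc, h2, h3], fun i hi1 hi2 => by omega⟩
    | none =>
      rw [hc] at h
      obtain ⟨h1, h2, h3, h4⟩ := ih h
      refine ⟨h1, by omega, h3, fun i hi1 hi2 => ?_⟩
      rcases Nat.lt_or_ge i (k + 1) with hi | hi
      · exact h4 i hi1 (by omega)
      · have : i = k + 1 := by omega
        subst this; exact hc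

-- B's per-item candidate: some (key length, font, char) if the item passes B's filter
def toOptB (upper : String) (n : Nat) (kv : String × String) : Option (Nat × String × String) :=
  if kv.2.toList = [] || !(decide (0 < kv.1.toList.length ∧ kv.1.toList.length < n)) ||
      !(PySem.Str.startswith upper kv.1) then none
  else
    match char_from_suffix (PySem.Str.slice upper (some ((kv.1.toList.length : Nat) : Int)) none) with
    | none => none
    | some c => if c.toList = [] then none else some (kv.1.toList.length, kv.2, c)

theorem stepB_eq (upper : String) (n : Nat) (best : Option (Nat × String × String))
    (kv : String × String) :
    decode_glyph_label_alt_step upper n best kv =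
      match toOptB upper n kv with
      | none => best
      | some t =>
        match best with
        | none => some t
        | some b => if t.1 > b.1 then some t else best := by
  unfold decode_glyph_label_alt_step toOptB
  dsimp only
  cases hb : (kv.2.toList = [] || !(decide (0 < kv.1.toList.length ∧ kv.1.toList.length < n)) ||
      !(PySem.Str.startswith upper kv.1))
  case true => rfl
  case false =>
    cases hcc : char_from_suffix (PySem.Str.slice upper (some ((kv.1.toList.length : Nat) : Int)) none)
    case none => rfl
    case some c =>
      by_cases h2 : c.toList = []
      · simp [h2]
      · simp [h2]

-- unpack a successful per-item candidate
theorem toOptB_some (upper : String) (n : Nat) (kv : String × String) (j : Nat) (f c : String)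
    (h : toOptB upper n kv = some (j, f, c)) :
    j = kv.1.length ∧ f = kv.2 ∧ 0 < j ∧ j < n ∧ f ≠ "" ∧
      kv.1.toList <+: upper.toList ∧
      char_from_suffix (PySem.Str.slice upper (some (j : Int)) none) = some c ∧ c ≠ "" := by
  simp only [toOptB] at h
  simp at h
  obtain ⟨⟨⟨hf, hk, hlen⟩, hsw⟩, hmatch⟩ := h
  cases hcc : char_from_suffix (PySem.Str.slice upper (some ((kv.1.length : Nat) : Int)) none) with
  | none => rw [hcc] at hmatch; simp at hmatch
  | some c' =>
    rw [hcc] at hmatch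
    by_cases hce : c' = ""
    · simp [hce] at hmatch
    · simp only [hce, reduceIte] at hmatch
      obtain ⟨hj, hf2, hc2⟩ : kv.1.length = j ∧ kv.2 = f ∧ c' = c := by
        simpa [Prod.ext_iff] using hmatch
      subst hj; subst hf2; subst hc2
      refine ⟨rfl, rfl, ?_, hlen, hf, (PySem.Chars.startswith_iff _ _).mp hsw, hcc, hce⟩
      have := String.length_toList (s := kv.1)
      have hkne : kv.1.toList ≠ [] := fun hh => hk (String.toList_eq_nil_iff.mp hh)
      have : kv.1.toList.length ≠ 0 := fun hh => hkne (List.length_eq_zero_iff.mp hh)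
      omega

-- a passing item of pm fires A's loop body at its key length (needs Nodup keys)
theorem toOptB_hit (upper : String) (pm : List (String × String))
    (hnd : (pm.map Prod.fst).Nodup) (kv : String × String) (hmem : kv ∈ pm)
    (j : Nat) (f c : String)
    (h : toOptB upper upper.toList.length kv = some (j, f, c)) :
    hitAt upper pm j = some (f, c) := by
  obtain ⟨hj, hf, hjpos, hjn, hfe, hpre, hcc, hce⟩ := toOptB_some _ _ _ _ _ _ h
  have htake : upper.toList.take j = kv.1.toList := by
    rw [hj, ← String.length_toList]
    exact (List.prefix_iff_eq_take.mp hpre).symm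
  have hkey : PySem.Str.slice upper none (some (j : Int)) = kv.1 :=
    String.toList_inj.mp (by rw [slice_pref_toList, htake])
  have hget : PySem.Dict.get? (PySem.Dict.mk pm) kv.1 = some kv.2 :=
    PySem.Dict.get?_of_mem_items _ hmem hnd
  have hsufne : PySem.Str.slice upper (some (j : Int)) none ≠ "" := by
    intro hh
    have : (PySem.Str.slice upper (some (j : Int)) none).toList = [] := by rw [hh]; rfl
    rw [slice_suf_toList] at this
    rw [List.drop_eq_nil_iff] at this
    omega
  subst hf
  have hjn' : j < upper.length := by rw [← String.length_toList]; exact hjn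
  unfold hitAt
  rw [hkey, hget]
  simp [hfe, hsufne, hcc, hce, hjn']

-- conversely, a firing split position comes from a passing item of pm
theorem hit_toOptB (upper : String) (pm : List (String × String)) (j : Nat) (f c : String)
    (h : hitAt upper pm j = some (f, c)) (hj : 1 ≤ j) :
    ∃ kv ∈ pm, toOptB upper upper.toList.length kv = some (j, f, c) := by
  unfold hitAt at h
  cases hg : PySem.Dict.get? (PySem.Dict.mk pm) (PySem.Str.slice upper none (some (j : Int))) with
  | none => rw [hg] at h; simp at h
  | some f' =>
    rw [hg] at h
    dsimp only at h
    by_cases h1 : (f'.toList = [] || (PySem.Str.slice upper (some (j : Int)) none).toList = []) = true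
    · rw [if_pos h1] at h; simp at h
    · rw [if_neg h1] at h
      simp only [Bool.or_eq_true, not_or, Bool.not_eq_true, decide_eq_false_iff_not] at h1
      obtain ⟨h1a, h1b⟩ := h1
      cases hcc : char_from_suffix (PySem.Str.slice upper (some (j : Int)) none) with
      | none => rw [hcc] at h; simp at h
      | some c' =>
        rw [hcc] at h
        dsimp only at h
        by_cases h2 : c'.toList = []
        · rw [if_pos h2] at h; simp at h
        · rw [if_neg h2] at h
          obtain ⟨hf, hc⟩ : f' = f ∧ c' = c := by simpa [Prod.ext_iff] using h
          have hmem : (PySem.Str.slice upper none (some (j : Int)), f') ∈ pm :=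
            PySem.Dict.mem_items_of_get?_eq_some _ hg
          refine ⟨_, hmem, ?_⟩
          have hjn : j < upper.toList.length := by
            by_contra hge
            apply h1b
            rw [slice_suf_toList, List.drop_eq_nil_iff]
            omega
          have hklen : (PySem.Str.slice upper none (some (j : Int))).toList.length = j := by
            rw [slice_pref_toList, List.length_take]
            omega
          have hsw : PySem.Str.startswith upper (PySem.Str.slice upper none (some (j : Int))) = true := by
            rw [PySem.Str.startswith_eq]
            apply (PySem.Chars.startswith_iff _ _).mpr
            rw [slice_pref_toList]
            exact List.take_prefix _ _
          have hb : (f'.toList = [] ||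
              !(decide (0 < (PySem.Str.slice upper none (some (j : Int))).toList.length ∧
                (PySem.Str.slice upper none (some (j : Int))).toList.length < upper.toList.length)) ||
              !(PySem.Str.startswith upper (PySem.Str.slice upper none (some (j : Int))))) = false := by
            rw [hklen, hsw]
            have he : upper.toList.length = upper.length := String.length_toList
            simp [h1a, hjn]
            omega
          unfold toOptB
          rw [hb, hklen, hcc]
          dsimp only
          rw [if_neg h2]
          simp [hf, hc]

-- fold facts
theorem foldl_stepB_acc_le (upper : String) (n : Nat) (l : List (String × String))
    (b : Nat × String × String) :
    ∃ r, l.foldl (decode_glyph_label_alt_step upper n) (some b) = some r ∧ b.1 ≤ r.1 := by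
  induction l generalizing b with
  | nil => exact ⟨b, rfl, le_refl _⟩
  | cons kv l ih =>
    simp only [List.foldl_cons, stepB_eq]
    cases toOptB upper n kv with
    | none => exact ih b
    | some t =>
      by_cases ht : t.1 > b.1
      · simp only [ht, reduceIte]
        obtain ⟨r, hr, hle⟩ := ih t
        exact ⟨r, hr, by omega⟩
      · simp only [ht, reduceIte]
        exact ih b

theorem foldl_stepB_lb (upper : String) (n : Nat) (l : List (String × String))
    (acc : Option (Nat × String × String)) (kv : String × String) (t : Nat × String × String)
    (hmem : kv ∈ l) (ht : toOptB upper n kv = some t) :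
    ∃ r, l.foldl (decode_glyph_label_alt_step upper n) acc = some r ∧ t.1 ≤ r.1 := by
  induction l generalizing acc with
  | nil => simp at hmem
  | cons kv' l ih =>
    rcases List.mem_cons.mp hmem with heq | hmem'
    · subst heq
      simp only [List.foldl_cons, stepB_eq, ht]
      cases acc with
      | none => exact foldl_stepB_acc_le upper n l t
      | some b =>
        by_cases hb : t.1 > b.1
        · simp only [hb, reduceIte]; exact foldl_stepB_acc_le upper n l t
        · simp only [hb, reduceIte]
          obtain ⟨r, hr, hle⟩ := foldl_stepB_acc_le upper n l b
          exact ⟨r, hr, by omega⟩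
    · exact ih _ hmem'

theorem foldl_stepB_mem (upper : String) (n : Nat) (l : List (String × String))
    (acc : Option (Nat × String × String)) (r : Nat × String × String)
    (h : l.foldl (decode_glyph_label_alt_step upper n) acc = some r) :
    acc = some r ∨ ∃ kv ∈ l, toOptB upper n kv = some r := by
  induction l generalizing acc with
  | nil => exact Or.inl h
  | cons kv l ih =>
    simp only [List.foldl_cons, stepB_eq] at h
    cases hto : toOptB upper n kv with
    | none =>
      rw [hto] at h
      rcases ih _ h with h' | ⟨kv', hm, h'⟩
      · exact Or.inl h'
      · exact Or.inr ⟨kv', List.mem_cons_of_mem _ hm, h'⟩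
    | some t =>
      rw [hto] at h
      have hcase : l.foldl (decode_glyph_label_alt_step upper n) (some t) = some r ∨
          l.foldl (decode_glyph_label_alt_step upper n) acc = some r := by
        cases acc with
        | none => exact Or.inl h
        | some b =>
          by_cases hb : t.1 > b.1
          · simp only [hb, reduceIte] at h; exact Or.inl h
          · simp only [hb, reduceIte] at h; exact Or.inr h
      rcases hcase with hcase | hcase
      · rcases ih _ hcase with h' | ⟨kv', hm, h'⟩
        · exact Or.inr ⟨kv, List.mem_cons_self, by rw [hto, h']⟩
        · exact Or.inr ⟨kv', List.mem_cons_of_mem _ hm, h'⟩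
      · rcases ih _ hcase with h' | ⟨kv', hm, h'⟩
        · exact Or.inl h'
        · exact Or.inr ⟨kv', List.mem_cons_of_mem _ hm, h'⟩

theorem foldl_stepB_none (upper : String) (n : Nat) (l : List (String × String))
    (h : ∀ kv ∈ l, toOptB upper n kv = none) :
    l.foldl (decode_glyph_label_alt_step upper n) none = none := by
  induction l with
  | nil => rfl
  | cons kv l ih =>
    simp only [List.foldl_cons, stepB_eq, h kv List.mem_cons_self]
    exact ih (fun kv' hm => h kv' (List.mem_cons_of_mem _ hm))

-- ===== VERDICT (by name: the statement is the Claim_ definition above) =====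
theorem decode_glyph_label_spec : Claim_equal_decode_glyph_label := by
  unfold Claim_equal_decode_glyph_label
  intro label pm _ hpre
  unfold Pre_decode_glyph_label at hpre
  unfold Spec_decode_glyph_label decode_glyph_label decode_glyph_label_alt
  dsimp only
  rw [loop_eq_topHit]
  cases hth : topHit (PySem.Str.upper label) pm (PySem.Str.upper label).toList.length with
  | none =>
    have hnone : ∀ kv ∈ pm, toOptB (PySem.Str.upper label) (PySem.Str.upper label).toList.length kv = none := by
      intro kv hm
      cases hto : toOptB (PySem.Str.upper label) (PySem.Str.upper label).toList.length kv with
      | none => rfl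
      | some t =>
        obtain ⟨j, f, c⟩ := t
        obtain ⟨_, _, hjpos, hjn, _⟩ := toOptB_some _ _ _ _ _ _ hto
        have hz := (topHit_none_iff _ pm _).mp hth j (by omega) (by omega)
        exact absurd (toOptB_hit _ pm hpre kv hm j f c hto) (by simp [hz])
    rw [foldl_stepB_none _ _ pm hnone]
    rfl
  | some t =>
    obtain ⟨j, f, c⟩ := t
    obtain ⟨hj1, hjn, hhit, hmax⟩ := topHit_some _ pm _ j f c hth
    obtain ⟨kv, hm, hto⟩ := hit_toOptB _ pm j f c hhit hj1
    obtain ⟨r, hr, hle⟩ := foldl_stepB_lb _ _ pm none kv (j, f, c) hm hto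
    rcases foldl_stepB_mem _ _ pm none r hr with h' | ⟨kv', hm', hto'⟩
    · simp at h'
    · obtain ⟨j', f', c'⟩ := r
      have hhit' : hitAt (PySem.Str.upper label) pm j' = some (f', c') :=
        toOptB_hit _ pm hpre kv' hm' j' f' c' hto'
      obtain ⟨_, _, _, hj'n, _⟩ := toOptB_some _ _ _ _ _ _ hto'
      have hj' : j' = j := by
        by_contra hne
        have hlt : j < j' := by simp at hle; omega
        exact absurd hhit' (by simp [hmax j' hlt (by omega)])
      subst hj'
      rw [hhit] at hhit'
      obtain ⟨hf, hc⟩ : f = f' ∧ c = c' := by simpa using hhit'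
      subst hf; subst hc
      rw [hr]
      rfl
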